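-- pv_equiv track=rewrite | github.com/AgustinCB/contests | adventOfCode2020/day21.py | count_non_allergic_ingredients
-- ===== SOURCE A (Python) =====
-- from typing import Tuple, Set, List, Dict
--
-- def count_non_allergic_ingredients(candidates: Dict[str, Set[str]], recipes: List[Tuple[Set[str], Set[str]]]) -> int:
--     fixed = set()
--     for c in candidates.values():
--         fixed = fixed.union(c)
--     ingredients = set()
--     for (i, _) in recipes:
--         ingredients = ingredients.union(i)
--     not_allergic = ingredients - fixed
--     return sum(len(i.intersection(not_allergic)) for (i, _) in recipes if len(i.intersection(not_allergic)) > 0)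
-- ===== SOURCE B (Python) =====
-- from typing import Tuple, Set, List, Dict
--
-- def count_non_allergic_ingredients(candidates: Dict[str, Set[str]], recipes: List[Tuple[Set[str], Set[str]]]) -> int:
--     # One pass: frequency table of how many recipes contain each ingredient,
--     # then sum the counts of ingredients outside the union of candidate sets.
--     counts: Dict[str, int] = {}
--     for (i, _) in recipes:
--         for x in i:
--             counts[x] = counts.get(x, 0) + 1
--     fixed = set()
--     for c in candidates.values():
--         fixed = fixed.union(c)
--     return sum(v for k, v in counts.items() if k not in fixed)
-- ===== Notes on version B (the rewrite author's own statement) =====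
-- stated objective: alternative
-- what changed: B replaces A's global ingredient-union plus per-recipe set intersections with a single frequency table built in one pass over the recipes, and computes the answer by summing the table's counts over the distinct ingredients not in the union of candidate sets.
import Mathlib
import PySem

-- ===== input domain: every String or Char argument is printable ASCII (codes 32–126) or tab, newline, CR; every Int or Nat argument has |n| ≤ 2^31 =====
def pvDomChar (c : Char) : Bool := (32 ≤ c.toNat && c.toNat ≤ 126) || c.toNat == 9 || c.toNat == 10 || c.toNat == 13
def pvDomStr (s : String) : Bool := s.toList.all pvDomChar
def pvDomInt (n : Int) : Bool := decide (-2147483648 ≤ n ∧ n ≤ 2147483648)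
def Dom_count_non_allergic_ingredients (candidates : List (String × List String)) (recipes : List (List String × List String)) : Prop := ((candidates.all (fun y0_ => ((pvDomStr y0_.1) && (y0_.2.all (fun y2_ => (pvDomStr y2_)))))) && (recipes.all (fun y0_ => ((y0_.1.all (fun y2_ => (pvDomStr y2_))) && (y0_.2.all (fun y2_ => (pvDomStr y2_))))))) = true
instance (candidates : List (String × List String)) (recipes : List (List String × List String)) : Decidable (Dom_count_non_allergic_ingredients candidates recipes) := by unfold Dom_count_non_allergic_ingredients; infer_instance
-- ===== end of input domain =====

-- B replaces A's union-of-ingredients plus per-recipe intersections by one frequency table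
-- (built in a single pass over the recipes) summed over the distinct ingredients not in `fixed`.

-- ===== PORT A =====
def count_non_allergic_ingredients (candidates : List (String × List String)) (recipes : List (List String × List String)) : Int :=
  -- fixed = set(); for c in candidates.values(): fixed = fixed.union(c)
  let fixed : PySem.Set String :=
    candidates.foldl (fun f c => PySem.Set.union f c.2) PySem.Set.empty
  -- ingredients = set(); for (i, _) in recipes: ingredients = ingredients.union(i)
  let ingredients : PySem.Set String :=
    recipes.foldl (fun s r => PySem.Set.union s r.1) PySem.Set.empty
  -- not_allergic = ingredients - fixed
  let notAllergic : PySem.Set String := PySem.Set.diff ingredients fixed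
  -- sum(len(i.intersection(not_allergic)) for (i, _) in recipes if len(i.intersection(not_allergic)) > 0)
  (((recipes.filter
      (fun r => 0 < (PySem.Set.inter (PySem.Set.ofList r.1) notAllergic).length)).map
      (fun r => ((PySem.Set.inter (PySem.Set.ofList r.1) notAllergic).length : Int))).sum)

-- ===== PORT B =====
def count_non_allergic_ingredients_alt (candidates : List (String × List String)) (recipes : List (List String × List String)) : Int :=
  -- counts = {}; for (i, _) in recipes: for x in i: counts[x] = counts.get(x, 0) + 1
  -- (the recipe ingredients are a Python set, so the inner loop runs over the distinct
  --  elements; set iteration order only affects the dict's key order, and the final sum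
  --  over the dict's items is order-independent, so the port is exact)
  let counts : PySem.Dict String Int :=
    recipes.foldl
      (fun d r => (PySem.Set.ofList r.1).foldl (fun d x => PySem.Dict.modify d x 0 (· + 1)) d)
      PySem.Dict.empty
  -- fixed = set(); for c in candidates.values(): fixed = fixed.union(c)
  let fixed : PySem.Set String :=
    candidates.foldl (fun f c => PySem.Set.union f c.2) PySem.Set.empty
  -- sum(v for k, v in counts.items() if k not in fixed)
  (((counts.items.filter (fun kv => !(PySem.Set.contains fixed kv.1))).map (fun kv => kv.2)).sum)

-- ===== PRECONDITION & SPEC =====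
def Spec_count_non_allergic_ingredients (candidates : List (String × List String)) (recipes : List (List String × List String)) (out : Int) : Prop := out = count_non_allergic_ingredients_alt candidates recipes
instance (candidates : List (String × List String)) (recipes : List (List String × List String)) (out : Int) : Decidable (Spec_count_non_allergic_ingredients candidates recipes out) := by unfold Spec_count_non_allergic_ingredients; infer_instance

-- ===== CLAIM (what is proved, stated in full; the proofs are below) =====
def Claim_equal_count_non_allergic_ingredients : Prop := ∀ (candidates : List (String × List String)) (recipes : List (List String × List String)), Dom_count_non_allergic_ingredients candidates recipes → Spec_count_non_allergic_ingredients candidates recipes (count_non_allergic_ingredients candidates recipes)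

-- ===== LEMMAS AND PROOFS =====

-- Dropping A's redundant `if len(...) > 0` filter does not change the sum (dropped terms are 0).
theorem pv_drop_pos {α : Type} (l : List α) (f : α → Nat) :
    ((l.filter (fun r => 0 < f r)).map (fun r => ((f r : Nat) : Int))).sum
      = (l.map (fun r => ((f r : Nat) : Int))).sum := by
  induction l with
  | nil => simp
  | cons a t ih =>
    by_cases h : 0 < f a
    · simp [List.filter_cons, h, ih]
    · have h0 : f a = 0 := by omega
      simp [List.filter_cons, h, h0, ih]

-- Membership in the accumulated union over the recipes' ingredient lists.
theorem pv_mem_foldl_union (l : List (List String × List String)) (s : PySem.Set String)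
    (x : String) :
    x ∈ l.foldl (fun s r => PySem.Set.union s r.1) s ↔ x ∈ s ∨ ∃ r ∈ l, x ∈ r.1 := by
  induction l generalizing s with
  | nil => simp
  | cons a t ih =>
    simp only [List.foldl_cons, ih, PySem.Set.mem_union, List.mem_cons]
    constructor
    · rintro ((h | h) | ⟨r, hr, hx⟩)
      · exact Or.inl h
      · exact Or.inr ⟨a, Or.inl rfl, h⟩
      · exact Or.inr ⟨r, Or.inr hr, hx⟩
    · rintro (h | ⟨r, (rfl | hr), hx⟩)
      · exact Or.inl (Or.inl h)
      · exact Or.inl (Or.inr hx)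
      · exact Or.inr ⟨r, hr, hx⟩

-- countP over a split of the list at one key: the occurrences of k plus the rest.
theorem pv_countP_split (xs : List String) (k : String) (p : String → Bool) :
    ((xs.countP p : Nat) : Int)
      = (if p k then ((xs.count k : Nat) : Int) else 0)
        + (((xs.filter (fun x => !(x == k))).countP p : Nat) : Int) := by
  induction xs with
  | nil => simp
  | cons a t ih =>
    by_cases hak : a = k
    · subst hak
      by_cases hp : p a
      · simp [List.countP_cons, List.count_cons, List.filter_cons, hp] at *
        push_cast at *
        omega
      · simp [List.countP_cons, List.count_cons, List.filter_cons, hp] at *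
        omega
    · have hba : (a == k) = false := by simp [hak]
      by_cases hp : p a
      · simp [List.countP_cons, List.count_cons, List.filter_cons, hp, hba, hak] at *
        push_cast at *
        omega
      · simp [List.countP_cons, List.count_cons, List.filter_cons, hp, hba, hak] at *
        omega

-- Core: summing the multiplicities of the keys of a duplicate-free cover d,
-- restricted to keys satisfying p, is counting the elements of xs satisfying p.
theorem pv_sum_counts (d : List String) (p : String → Bool) :
    ∀ xs : List String, d.Nodup → (∀ x ∈ xs, x ∈ d) →
      (d.map (fun k => if p k then ((xs.count k : Nat) : Int) else 0)).sum
        = ((xs.countP p : Nat) : Int) := by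
  induction d with
  | nil =>
    intro xs _ hcov
    have : xs = [] := List.eq_nil_iff_forall_not_mem.mpr (fun x hx => by simpa using hcov x hx)
    simp [this]
  | cons k rest ih =>
    intro xs hnd hcov
    have hnd' : rest.Nodup := (List.nodup_cons.mp hnd).2
    have hknr : k ∉ rest := (List.nodup_cons.mp hnd).1
    have hcov' : ∀ x ∈ xs.filter (fun x => !(x == k)), x ∈ rest := by
      intro x hx
      have hmem := List.mem_of_mem_filter hx
      have hne : ¬(x == k) = true := by
        have := List.of_mem_filter hx
        simpa using this
      rcases List.mem_cons.mp (hcov x hmem) with h | h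
      · exact absurd (by simp [h]) hne
      · exact h
    have hrec := ih (xs.filter (fun x => !(x == k))) hnd' hcov'
    have hcounts : ∀ j ∈ rest,
        (if p j then (((xs.filter (fun x => !(x == k))).count j : Nat) : Int) else 0)
          = (if p j then ((xs.count j : Nat) : Int) else 0) := by
      intro j hj
      have hjk : (j == k) = false := by
        simp only [beq_eq_false_iff_ne]
        intro h; exact hknr (h ▸ hj)
      rw [List.count_filter (by simp [hjk])]
    rw [List.map_cons, List.sum_cons, ← List.map_congr_left hcounts, hrec,
      pv_countP_split xs k p]

-- Per-recipe: |i ∩ not_allergic| counts the distinct ingredients of i outside fixed,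
-- provided na.contains agrees with ¬fix.contains on i's elements.
theorem pv_inter_len (i : List String) (na fix : PySem.Set String)
    (h : ∀ x ∈ i, na.contains x = !(fix.contains x)) :
    (((PySem.Set.inter (PySem.Set.ofList i) na).length : Nat) : Int)
      = (((PySem.Set.ofList i).countP (fun x => !(fix.contains x)) : Nat) : Int) := by
  have : (PySem.Set.inter (PySem.Set.ofList i) na).length
      = (PySem.Set.ofList i).countP (fun x => !(fix.contains x)) := by
    rw [show PySem.Set.inter (PySem.Set.ofList i) na
          = (PySem.Set.ofList i).filter (fun x => na.contains x) from rfl,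
      ← List.countP_eq_length_filter]
    exact List.countP_congr (fun x hx => by
      rw [h x ((PySem.Set.mem_ofList _ _).mp hx)])
  rw [this]

-- A's per-recipe sum equals one global countP over the concatenated distinct ingredient lists.
theorem pv_a_sum (l : List (List String × List String)) (na fix : PySem.Set String)
    (h : ∀ r ∈ l, ∀ x ∈ r.1, na.contains x = !(fix.contains x)) :
    (l.map (fun r => (((PySem.Set.inter (PySem.Set.ofList r.1) na).length : Nat) : Int))).sum
      = (((l.flatMap (fun r => PySem.Set.ofList r.1)).countP (fun x => !(fix.contains x)) : Nat) : Int) := by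
  induction l with
  | nil => simp
  | cons a t ih =>
    rw [List.map_cons, List.sum_cons, List.flatMap_cons, List.countP_append,
      ih (fun r hr => h r (List.mem_cons_of_mem a hr)),
      pv_inter_len a.1 na fix (h a (List.mem_cons_self ..))]
    push_cast
    ring

-- Restricting a sum to a filtered list is summing an if-then-else over the whole list.
theorem pv_sum_filter_ite (l : List String) (p : String → Bool) (f : String → Int) :
    ((l.filter p).map f).sum = (l.map (fun k => if p k then f k else 0)).sum := by
  induction l with
  | nil => simp
  | cons a t ih =>
    by_cases hp : p a <;> simp [List.filter_cons, hp, ih]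

-- ===== VERDICT (by name: the statement is the Claim_ definition above) =====
theorem count_non_allergic_ingredients_spec : Claim_equal_count_non_allergic_ingredients := by
  intro candidates recipes _
  unfold Spec_count_non_allergic_ingredients
  unfold count_non_allergic_ingredients count_non_allergic_ingredients_alt
  simp only []
  set fixed : PySem.Set String :=
    candidates.foldl (fun f c => PySem.Set.union f c.2) PySem.Set.empty with hfixed
  set ingredients : PySem.Set String :=
    recipes.foldl (fun s r => PySem.Set.union s r.1) PySem.Set.empty with hing
  set xs : List String := recipes.flatMap (fun r => PySem.Set.ofList r.1) with hxs
  -- B: the nested counting loop is Counter(xs); its items are the distinct keys with counts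
  rw [show recipes.foldl
        (fun d r => (PySem.Set.ofList r.1).foldl (fun d x => PySem.Dict.modify d x 0 (· + 1)) d)
        PySem.Dict.empty
      = PySem.Dict.counter xs from (List.foldl_flatMap ..).symm, PySem.Dict.items_counter,
    List.filter_map, List.map_map]
  have hcomp :
      ((fun kv : String × Int => !(fixed.contains kv.1)) ∘ fun k => (k, ((xs.count k : Nat) : Int)))
        = fun k => !(fixed.contains k) := rfl
  rw [hcomp]
  have hcomp2 :
      ((fun kv : String × Int => kv.2) ∘ fun k => (k, ((xs.count k : Nat) : Int)))
        = fun k => ((xs.count k : Nat) : Int) := rfl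
  rw [hcomp2, pv_sum_filter_ite, pv_sum_counts (PySem.Set.ofList xs) _ xs
    (PySem.Set.nodup_ofList xs) (fun x hx => (PySem.Set.mem_ofList _ _).mpr hx)]
  -- A: drop the redundant positivity filter, then collapse to the same global countP
  rw [pv_drop_pos, pv_a_sum recipes (PySem.Set.diff ingredients fixed) fixed]
  intro r hr x hx
  have hmem : x ∈ ingredients := by
    rw [hing, pv_mem_foldl_union]
    exact Or.inr ⟨r, hr, hx⟩
  by_cases hf : x ∈ fixed
  · have h2 : fixed.contains x = true := by rw [PySem.Set.contains_iff]; exact hf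
    have h1 : (PySem.Set.diff ingredients fixed).contains x = false := by
      rw [Bool.eq_false_iff]
      intro hc
      rw [PySem.Set.contains_iff, PySem.Set.mem_diff] at hc
      exact hc.2 hf
    rw [h1, h2]
    rfl
  · have h2 : fixed.contains x = false := by
      rw [Bool.eq_false_iff]
      intro hc
      rw [PySem.Set.contains_iff] at hc
      exact hf hc
    have h1 : (PySem.Set.diff ingredients fixed).contains x = true := by
      rw [PySem.Set.contains_iff, PySem.Set.mem_diff]
      exact ⟨hmem, hf⟩
    rw [h1, h2]
    rfl
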